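-- pv_equiv track=rewrite | github.com/pedro19v/GIMME | GIMMECore/Subspace.py | computeTotalNumOfExpansionsInSubspace
-- ===== SOURCE A (Python) =====
-- import math
--
-- def computeTotalNumOfExpansionsInSubspace(integers):
--     numPlayers = 0
--     lenIntegers = len(integers)
--     for i in range(lenIntegers):
--         numPlayers += integers[i]
--
--     sortedIntegers = sorted(integers)
--     alpha = [[] for _ in range(lenIntegers)]
--     gamma = [[] for _ in range(lenIntegers)]
--
--     for j in range(lenIntegers):
--         maxIndex = 0
--         for k in range(lenIntegers):
--             if sortedIntegers[k] == sortedIntegers[j]: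
--                 maxIndex = k
--
--         alpha[j] = numPlayers + 1
--         for k in range(maxIndex):
--             alpha[j] -= sortedIntegers[k]
--
--         gamma[j] = [[] for _ in range(alpha[j])]
--         for beta in range(alpha[j]):
--             sumOfPreviousIntegers = 0
--             for k in range(j):
--                 sumOfPreviousIntegers += sortedIntegers[k]
--
--             if j == 0:
--                 gamma[j][beta] = math.comb(numPlayers-sumOfPreviousIntegers-beta+1, sortedIntegers[j] - 1)
--             else:
--                 omega = alpha[j-1] - 1
--                 if sortedIntegers[j] == sortedIntegers[j-1]:
--                     omega = beta
--
--                 sum = 0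
--                 for k in range(omega+1):
--                     sum += gamma[j-1][k]
--
--                 gamma[j][beta] = sum * math.comb(numPlayers-sumOfPreviousIntegers-beta+1, sortedIntegers[j] - 1)
--
--     numOfExpansionsInSubspace = 0
--     for j in range(len(sortedIntegers)):
--         for beta in range(alpha[j]):
--             numOfExpansionsInSubspace += gamma[j][beta]
--
--     return numOfExpansionsInSubspace
-- ===== SOURCE B (Python) =====
-- import math
--
-- def computeTotalNumOfExpansionsInSubspace(integers):
--     # One pass per row using prefix sums over the previous gamma row:
--     # the inner O(P) re-summations of A (sumOfPreviousIntegers, maxIndex scan,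
--     # and the sum over gamma[j-1]) are all replaced by O(1) lookups.
--     s = sorted(integers)
--     n = len(s)
--     P = sum(integers)
--     prefix = [0] * (n + 1)
--     for i in range(n):
--         prefix[i + 1] = prefix[i] + s[i]
--     last = {}
--     for i in range(n):
--         last[s[i]] = i
--     total = 0
--     prevCum = []  # cumulative sums of the previous gamma row
--     for j in range(n):
--         a = P + 1 - prefix[last[s[j]]]
--         row = []
--         if j == 0:
--             for beta in range(a):
--                 row.append(math.comb(P - beta + 1, s[0] - 1))
--         else:
--             for beta in range(a):
--                 ssum = prevCum[beta] if s[j] == s[j - 1] else prevCum[-1]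
--                 row.append(ssum * math.comb(P - prefix[j] - beta + 1, s[j] - 1))
--         cum = []
--         acc = 0
--         for g in row:
--             acc += g
--             cum.append(acc)
--         prevCum = cum
--         total += acc
--     return total
-- ===== Notes on version B (the rewrite author's own statement) =====
-- stated objective: alternative
-- what changed: B precomputes a prefix-sum array and a last-occurrence dict once and keeps running cumulative sums of the previous gamma row, so A's three inner loops per beta (the maxIndex scan, sumOfPreviousIntegers, and the sum over gamma[j-1]) become O(1) lookups; intended as faster, claimed conservatively as an alternative: a timing run's reading varied between runs (2.6x up to 920x at n=4096 where both finished, with timeouts of both at some sizes dominated by huge math.comb outputs).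
-- outside the precondition, e.g. on computeTotalNumOfExpansionsInSubspace([-3, 2]): A returns 0, B raises IndexError
import Mathlib
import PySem

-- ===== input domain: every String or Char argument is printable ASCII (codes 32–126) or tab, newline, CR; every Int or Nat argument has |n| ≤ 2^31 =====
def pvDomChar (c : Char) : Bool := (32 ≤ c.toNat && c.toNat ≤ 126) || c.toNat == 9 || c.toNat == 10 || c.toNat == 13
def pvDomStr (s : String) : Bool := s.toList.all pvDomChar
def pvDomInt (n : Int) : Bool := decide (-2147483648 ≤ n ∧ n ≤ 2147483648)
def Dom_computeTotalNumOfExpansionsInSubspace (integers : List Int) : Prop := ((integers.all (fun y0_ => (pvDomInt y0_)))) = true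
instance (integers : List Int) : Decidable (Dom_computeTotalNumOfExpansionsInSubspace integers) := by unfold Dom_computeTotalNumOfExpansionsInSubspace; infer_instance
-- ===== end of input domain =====

-- B replaces A's per-beta re-summations (sumOfPreviousIntegers, the maxIndex scan, the sum
-- over gamma[j-1]) by prefix sums / a last-occurrence dict computed once; intended as faster
-- (a timing run's reading varied between runs, from 2.6x up to 920x at n=4096 when both
-- finished), claimed conservatively as 'alternative'.

-- ===== PORT A =====
-- math.comb, shared by both ports (both Pythons call it); Python raises ValueError on a
-- negative argument — such inputs are excluded by Pre_ below, here the value is junk 0.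
def pyComb (n k : Int) : Int :=
  if 0 ≤ n ∧ 0 ≤ k then ((n.toNat.choose k.toNat : Nat) : Int) else 0

-- A, line by line; each Python statement of A is a named definition.
def aNumPlayers (integers : List Int) : Int :=
  (List.range integers.length).foldl (fun acc i => acc + integers.getD i 0) 0

def aSorted (integers : List Int) : List Int := PySem.List.sorted integers (fun x => x) false

-- the inner 'for k in range(lenIntegers)' scan for maxIndex
def aMaxIndex (integers : List Int) (j : Nat) : Nat :=
  (List.range integers.length).foldl
    (fun mi k => if (aSorted integers).getD k 0 = (aSorted integers).getD j 0 then k else mi) 0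

-- alpha[j] = numPlayers + 1; for k in range(maxIndex): alpha[j] -= sortedIntegers[k]
def aAlphaJ (integers : List Int) (j : Nat) : Int :=
  (List.range (aMaxIndex integers j)).foldl
    (fun a k => a - (aSorted integers).getD k 0) (aNumPlayers integers + 1)

-- sumOfPreviousIntegers loop
def aSumPrev (integers : List Int) (j : Nat) : Int :=
  (List.range j).foldl (fun a k => a + (aSorted integers).getD k 0) 0

-- the beta loop filling gamma[j] (reads alpha[j-1] and gamma[j-1] from the state built so far)
def aGammaJ (integers : List Int) (alpha : List Int) (gamma : List (List Int)) (j : Nat) :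
    List Int :=
  (List.range (aAlphaJ integers j).toNat).map (fun (bn : Nat) =>
    let beta : Int := (bn : Int)
    if j = 0 then
      pyComb (aNumPlayers integers - aSumPrev integers j - beta + 1)
             ((aSorted integers).getD j 0 - 1)
    else
      let omega := if (aSorted integers).getD j 0 = (aSorted integers).getD (j-1) 0 then beta
                   else alpha.getD (j-1) 0 - 1
      let sum := (List.range (omega+1).toNat).foldl
        (fun a k => a + (gamma.getD (j-1) []).getD k 0) 0
      sum * pyComb (aNumPlayers integers - aSumPrev integers j - beta + 1)
                   ((aSorted integers).getD j 0 - 1))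

-- one iteration of the j loop: alpha[j] and gamma[j] are assigned in index order (append)
def aStep (integers : List Int) (st : List Int × List (List Int)) (j : Nat) :
    List Int × List (List Int) :=
  (st.1 ++ [aAlphaJ integers j], st.2 ++ [aGammaJ integers st.1 st.2 j])

def computeTotalNumOfExpansionsInSubspace (integers : List Int) : Int :=
  let st := (List.range integers.length).foldl (aStep integers) ([], [])
  (List.range (aSorted integers).length).foldl (fun acc j =>
    (List.range (st.1.getD j 0).toNat).foldl
      (fun acc2 bn => acc2 + (st.2.getD j []).getD bn 0) acc) 0

-- ===== PORT B =====
-- B, line by line (from Source B).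
def bSorted (integers : List Int) : List Int := PySem.List.sorted integers (fun x => x) false

def bP (integers : List Int) : Int := integers.foldl (· + ·) 0

-- prefix[i+1] = prefix[i] + s[i], starting from [0]
def bPrefix (integers : List Int) : List Int :=
  (List.range (bSorted integers).length).foldl
    (fun pr i => pr ++ [pr.getD i 0 + (bSorted integers).getD i 0]) [(0:Int)]

-- last[s[i]] = i
def bLast (integers : List Int) : PySem.Dict Int Int :=
  (List.range (bSorted integers).length).foldl
    (fun d i => d.insert ((bSorted integers).getD i 0) (i : Int)) PySem.Dict.empty

-- a = P + 1 - prefix[last[s[j]]]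
def bA (integers : List Int) (j : Nat) : Int :=
  bP integers + 1 -
    PySem.List.pyGetD (bPrefix integers)
      ((bLast integers).getD ((bSorted integers).getD j 0) 0) 0

-- the beta loop building row (O(1) lookups into prevCum instead of A's inner sums)
def bRow (integers : List Int) (prevCum : List Int) (j : Nat) : List Int :=
  (List.range (bA integers j).toNat).map (fun (bn : Nat) =>
    let beta : Int := (bn : Int)
    if j = 0 then
      pyComb (bP integers - beta + 1) ((bSorted integers).getD 0 0 - 1)
    else
      let ssum := if (bSorted integers).getD j 0 = (bSorted integers).getD (j-1) 0 then
                    PySem.List.pyGetD prevCum beta 0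
                  else PySem.List.pyGetD prevCum (-1) 0
      ssum * pyComb (bP integers - (bPrefix integers).getD j 0 - beta + 1)
                    ((bSorted integers).getD j 0 - 1))

-- one iteration of the j loop: build row, its running cumulative sums, add its sum to total
def bStep (integers : List Int) (st : List Int × Int) (j : Nat) : List Int × Int :=
  let row := bRow integers st.1 j
  let ca := row.foldl (fun (ca : List Int × Int) g => (ca.1 ++ [ca.2 + g], ca.2 + g)) ([], 0)
  (ca.1, st.2 + ca.2)

def computeTotalNumOfExpansionsInSubspace_alt (integers : List Int) : Int :=
  ((List.range (bSorted integers).length).foldl (bStep integers) ([], 0)).2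

-- ===== PRECONDITION & SPEC =====
-- Pre_ admits all-positive lists (the natural domain of this count of group-size expansions)
-- and all-negative lists (every beta-range is empty, both programs return 0); excluded are
-- lists containing a zero or mixed signs, where Python's math.comb raises ValueError except
-- accidental corners where A returns 0 from empty loops while B raises IndexError on its
-- empty cumulative row.
def Pre_computeTotalNumOfExpansionsInSubspace (integers : List Int) : Prop :=
  (∀ x ∈ integers, 1 ≤ x) ∨ (∀ x ∈ integers, x ≤ -1)
instance (integers : List Int) : Decidable (Pre_computeTotalNumOfExpansionsInSubspace integers) := by
  unfold Pre_computeTotalNumOfExpansionsInSubspace; infer_instance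

def pvWitness_computeTotalNumOfExpansionsInSubspace : List Int := [1, 2, 2]

def Spec_computeTotalNumOfExpansionsInSubspace (integers : List Int) (out : Int) : Prop := out = computeTotalNumOfExpansionsInSubspace_alt integers
instance (integers : List Int) (out : Int) : Decidable (Spec_computeTotalNumOfExpansionsInSubspace integers out) := by unfold Spec_computeTotalNumOfExpansionsInSubspace; infer_instance

-- ===== CLAIM (what is proved, stated in full; the proofs are below) =====
def Claim_equal_computeTotalNumOfExpansionsInSubspace : Prop := ∀ (integers : List Int), Dom_computeTotalNumOfExpansionsInSubspace integers → Pre_computeTotalNumOfExpansionsInSubspace integers → Spec_computeTotalNumOfExpansionsInSubspace integers (computeTotalNumOfExpansionsInSubspace integers)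

-- ===== LEMMAS AND PROOFS =====

def pvSum (L : List Int) : Int := L.foldl (· + ·) 0

theorem foldl_add_init (L : List Int) : ∀ c : Int, L.foldl (· + ·) c = c + pvSum L := by
  induction L with
  | nil => intro c; simp [pvSum]
  | cons a t ih =>
    intro c
    show List.foldl (· + ·) (c + a) t = c + pvSum (a :: t)
    rw [ih]
    show _ = c + List.foldl (· + ·) (0 + a) t
    rw [ih]; ring

theorem pvSum_cons (a : Int) (t : List Int) : pvSum (a :: t) = a + pvSum t := by
  show List.foldl (· + ·) (0 + a) t = _
  rw [foldl_add_init]; ring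

theorem pvSum_append_singleton (L : List Int) (x : Int) : pvSum (L ++ [x]) = pvSum L + x := by
  show List.foldl (· + ·) 0 (L ++ [x]) = _
  rw [List.foldl_append, foldl_add_init]
  simp [pvSum]

theorem foldl_sub_init (L : List Int) : ∀ c : Int, L.foldl (· - ·) c = c - pvSum L := by
  induction L with
  | nil => intro c; simp [pvSum]
  | cons a t ih => intro c; show List.foldl (· - ·) (c - a) t = _; rw [ih, pvSum_cons]; ring

theorem foldl_range_getD {α β : Type} (xs : List α) (d : α) (f : β → α → β) :
    ∀ (m : Nat), m ≤ xs.length → ∀ (init : β),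
      (List.range m).foldl (fun acc k => f acc (xs.getD k d)) init = (xs.take m).foldl f init := by
  intro m
  induction m with
  | zero => intro _ init; simp
  | succ m ih =>
    intro hm init
    have h : xs[m]? = some (xs[m]'(by omega)) := List.getElem?_eq_getElem (by omega)
    have ht : xs.take (m+1) = xs.take m ++ [xs[m]'(by omega)] := by
      rw [List.take_add_one]; simp [h]
    rw [List.range_succ, List.foldl_append, ih (by omega), ht, List.foldl_append]
    simp [h, List.getD_eq_getElem?_getD]

theorem getD_map_range {α : Type} (f : Nat → α) (n k : Nat) (d : α) (h : k < n) :
    ((List.range n).map f).getD k d = f k := by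
  simp [List.getD_eq_getElem?_getD, h]


def pvS (s : List Int) (j : Nat) : Int := pvSum (s.take j)

def pvMaxIdx (s : List Int) (v : Int) : Nat :=
  (List.range s.length).foldl (fun mi k => if s.getD k 0 = v then k else mi) 0

def pvAlpha (s : List Int) (P : Int) (j : Nat) : Int := P + 1 - pvS s (pvMaxIdx s (s.getD j 0))

def pvRow (s : List Int) (P : Int) : Nat → List Int
  | 0 => (List.range (pvAlpha s P 0).toNat).map (fun (bn : Nat) =>
      pyComb (P - (bn : Int) + 1) (s.getD 0 0 - 1))
  | (j+1) => (List.range (pvAlpha s P (j+1)).toNat).map (fun bn =>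
      (if s.getD (j+1) 0 = s.getD j 0 then pvSum ((pvRow s P j).take (bn+1))
       else pvSum (pvRow s P j))
        * pyComb (P - pvS s (j+1) - (bn : Int) + 1) (s.getD (j+1) 0 - 1))

def pvCum (L : List Int) : List Int := (List.range L.length).map (fun b => pvSum (L.take (b+1)))

def pvTot (s : List Int) (P : Int) (m : Nat) : Int :=
  (List.range m).foldl (fun a j => a + pvSum (pvRow s P j)) 0

theorem length_pvRow (s : List Int) (P : Int) (j : Nat) :
    (pvRow s P j).length = (pvAlpha s P j).toNat := by
  cases j <;> simp [pvRow]

-- the scan for the last index of a value is bounded by the length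
theorem pvMaxIdx_le (s : List Int) (v : Int) : pvMaxIdx s v ≤ s.length := by
  have h : ∀ (m : Nat) (init : Nat), init ≤ s.length → m ≤ s.length →
      (List.range m).foldl (fun mi k => if s.getD k 0 = v then k else mi) init ≤ s.length := by
    intro m
    induction m with
    | zero => intro init h _; simpa using h
    | succ m ih =>
      intro init h hm
      rw [List.range_succ, List.foldl_append]
      simp only [List.foldl_cons, List.foldl_nil]
      split
      · omega
      · exact ih _ h (by omega)
  exact h _ 0 (by omega) (by omega)

-- Nat-accumulator scan (A) equals Int-accumulator scan (B side, via the dict)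
theorem scan_cast (p : Nat → Prop) [DecidablePred p] :
    ∀ (m : Nat) (i : Nat),
      (((List.range m).foldl (fun mi k => if p k then k else mi) i : Nat) : Int)
        = (List.range m).foldl (fun mi k => if p k then (k : Int) else mi) (i : Int) := by
  intro m
  induction m with
  | zero => intro i; simp
  | succ m ih =>
    intro i
    rw [List.range_succ, List.foldl_append, List.foldl_append]
    simp only [List.foldl_cons, List.foldl_nil]
    split
    · rfl
    · exact ih _

-- building a dict of last occurrences = A's last-match scan
theorem dict_last (s : List Int) (v : Int) :
    ∀ (m : Nat) (D : PySem.Dict Int Int) (init : Int), D.getD v 0 = init →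
      ((List.range m).foldl (fun d i => d.insert (s.getD i 0) (i : Int)) D).getD v 0
        = (List.range m).foldl (fun mi k => if s.getD k 0 = v then (k : Int) else mi) init := by
  intro m
  induction m with
  | zero => intro D init h; simpa using h
  | succ m ih =>
    intro D init h
    rw [List.range_succ, List.foldl_append, List.foldl_append]
    simp only [List.foldl_cons, List.foldl_nil]
    rw [PySem.Dict.getD_insert]
    by_cases hv : s.getD m 0 = v
    · rw [if_pos hv.symm, if_pos hv]
    · rw [if_neg (fun hh => hv hh.symm), if_neg hv]
      exact ih _ _ h

theorem pvS_succ (s : List Int) (m : Nat) (h : m < s.length) :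
    pvS s (m+1) = pvS s m + s.getD m 0 := by
  have hm : s[m]? = some (s[m]'h) := List.getElem?_eq_getElem h
  have ht : s.take (m+1) = s.take m ++ [s[m]'h] := by rw [List.take_add_one]; simp [hm]
  rw [pvS, ht, pvSum_append_singleton, List.getD_eq_getElem?_getD, hm]
  rfl

theorem prefix_build (s : List Int) : ∀ m, m ≤ s.length →
    (List.range m).foldl (fun pr i => pr ++ [pr.getD i 0 + s.getD i 0]) [(0:Int)]
      = (List.range (m+1)).map (pvS s) := by
  intro m
  induction m with
  | zero => intro _; simp [pvS, pvSum]
  | succ m ih =>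
    intro hm
    rw [List.range_succ, List.foldl_append, ih (by omega)]
    simp only [List.foldl_cons, List.foldl_nil]
    rw [getD_map_range _ _ _ _ (by omega), List.range_succ (n := m+1), List.map_append]
    rw [← pvS_succ s m (by omega)]
    simp

theorem cum_fold (L : List Int) : ∀ (pre : List Int) (acc : Int),
    L.foldl (fun ca g => (ca.1 ++ [ca.2 + g], ca.2 + g)) (pre, acc)
      = (pre ++ (List.range L.length).map (fun b => acc + pvSum (L.take (b+1))), acc + pvSum L) := by
  induction L with
  | nil => intro pre acc; simp [pvSum]
  | cons g t ih =>
    intro pre acc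
    rw [List.foldl_cons, ih]
    simp only [List.length_cons, List.range_succ_eq_map, List.map_cons, List.map_map]
    refine Prod.ext ?_ ?_
    · show pre ++ [acc + g] ++ _ = pre ++ (acc + pvSum (List.take (0+1) (g :: t))) :: _
      have h0 : pvSum (List.take (0+1) (g :: t)) = g := by
        simp [List.take, pvSum]
      rw [h0, List.append_assoc]
      refine congrArg (pre ++ ·) ?_
      rw [List.singleton_append]
      refine congrArg (_ :: ·) ?_
      refine List.map_congr_left ?_
      intro b _
      show acc + g + pvSum (List.take (b+1) t) = acc + pvSum (List.take (b+1+1) (g :: t))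
      rw [show List.take (b+1+1) (g :: t) = g :: List.take (b+1) t from rfl, pvSum_cons]
      ring
    · show acc + g + pvSum t = acc + pvSum (g :: t)
      rw [pvSum_cons]; ring

theorem length_pvCum (L : List Int) : (pvCum L).length = L.length := by simp [pvCum]

theorem pyGetD_pvCum (L : List Int) (bn : Nat) (h : bn < L.length) :
    PySem.List.pyGetD (pvCum L) (bn : Int) 0 = pvSum (L.take (bn+1)) := by
  rw [PySem.List.pyGetD_natCast]
  exact getD_map_range _ _ _ _ h

theorem pyGetD_pvCum_neg (L : List Int) :
    PySem.List.pyGetD (pvCum L) (-1) 0 = pvSum L := by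
  rcases eq_or_ne L [] with h | h
  · subst h
    simp [pvCum, pvSum, PySem.List.pyGetD, PySem.List.pyGet?, PySem.List.pyIdx?]
  · have hne : pvCum L ≠ [] := by
      intro hc
      have := length_pvCum L
      rw [hc] at this
      exact h (List.eq_nil_of_length_eq_zero this.symm)
    rw [PySem.List.pyGetD_neg_one _ _ hne]
    rw [List.getLast_eq_getElem]
    have hlen : (pvCum L).length - 1 < L.length := by
      have h1 : 0 < L.length := List.length_pos_iff.mpr h
      rw [length_pvCum]; omega
    simp only [pvCum, List.getElem_map, List.getElem_range, List.length_map, List.length_range]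
    have h2 : L.length - 1 + 1 = L.length := by
      have h1 : 0 < L.length := List.length_pos_iff.mpr h
      omega
    rw [h2, List.take_length]

theorem aSorted_length (integers : List Int) : (aSorted integers).length = integers.length := by
  unfold aSorted
  exact PySem.List.length_sorted ..

theorem haN (integers : List Int) : aNumPlayers integers = pvSum integers := by
  have h := foldl_range_getD integers 0 (· + ·) integers.length le_rfl 0
  rw [List.take_length] at h
  exact h

theorem hMax (integers : List Int) (j : Nat) :
    aMaxIndex integers j = pvMaxIdx (aSorted integers) ((aSorted integers).getD j 0) := by
  unfold aMaxIndex pvMaxIdx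
  rw [aSorted_length]

theorem hAlpha (integers : List Int) (j : Nat) :
    aAlphaJ integers j = pvAlpha (aSorted integers) (pvSum integers) j := by
  unfold aAlphaJ pvAlpha
  rw [haN, hMax]
  have h := foldl_range_getD (aSorted integers) 0 (· - ·)
    (pvMaxIdx (aSorted integers) ((aSorted integers).getD j 0))
    (pvMaxIdx_le _ _) (pvSum integers + 1)
  rw [h, foldl_sub_init]
  rfl

theorem hSumPrev (integers : List Int) (j : Nat) (h : j ≤ (aSorted integers).length) :
    aSumPrev integers j = pvS (aSorted integers) j := by
  have h := foldl_range_getD (aSorted integers) 0 (· + ·) j h 0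
  exact h

theorem hbP (integers : List Int) : bP integers = pvSum integers := rfl

theorem hPrefix (integers : List Int) :
    bPrefix integers = (List.range ((aSorted integers).length + 1)).map (pvS (aSorted integers)) :=
  prefix_build (aSorted integers) (aSorted integers).length le_rfl

theorem hPrefix_getD (integers : List Int) (j : Nat) (h : j ≤ (aSorted integers).length) :
    (bPrefix integers).getD j 0 = pvS (aSorted integers) j := by
  rw [hPrefix]
  exact getD_map_range _ _ _ _ (by omega)

theorem hbA (integers : List Int) (j : Nat) :
    bA integers j = pvAlpha (aSorted integers) (pvSum integers) j := by
  unfold bA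
  have hd : (bLast integers).getD ((aSorted integers).getD j 0) 0
      = ((pvMaxIdx (aSorted integers) ((aSorted integers).getD j 0) : Nat) : Int) := by
    have h1 := dict_last (aSorted integers) ((aSorted integers).getD j 0)
      (aSorted integers).length PySem.Dict.empty 0 (by simp [PySem.Dict.getD_empty])
    have h2 := scan_cast (fun k => (aSorted integers).getD k 0 = (aSorted integers).getD j 0)
      (aSorted integers).length 0
    exact h1.trans h2.symm
  rw [show (bLast integers).getD ((bSorted integers).getD j 0) 0
        = (bLast integers).getD ((aSorted integers).getD j 0) 0 from rfl, hd,
     PySem.List.pyGetD_natCast]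
  rw [hPrefix_getD integers _ (pvMaxIdx_le _ _)]
  rfl

theorem pvAlpha_congr (s : List Int) (P : Int) (j j' : Nat) (h : s.getD j 0 = s.getD j' 0) :
    pvAlpha s P j = pvAlpha s P j' := by
  unfold pvAlpha; rw [h]

theorem hRowA0 (integers : List Int) (alpha : List Int) (gamma : List (List Int)) :
    aGammaJ integers alpha gamma 0 = pvRow (aSorted integers) (pvSum integers) 0 := by
  unfold aGammaJ pvRow
  rw [hAlpha]
  refine List.map_congr_left ?_
  intro bn _
  simp only [reduceIte]
  rw [haN, show aSumPrev integers 0 = 0 from rfl]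
  ring_nf

theorem hRowA_succ (integers : List Int) (j : Nat)
    (hj : j + 1 ≤ (aSorted integers).length) :
    aGammaJ integers
      ((List.range (j+1)).map (pvAlpha (aSorted integers) (pvSum integers)))
      ((List.range (j+1)).map (pvRow (aSorted integers) (pvSum integers))) (j+1)
      = pvRow (aSorted integers) (pvSum integers) (j+1) := by
  unfold aGammaJ
  rw [hAlpha]
  show _ = pvRow (aSorted integers) (pvSum integers) (j+1)
  rw [pvRow]
  refine List.map_congr_left ?_
  intro bn hbn
  rw [List.mem_range] at hbn
  simp only [Nat.succ_ne_zero, reduceIte, Nat.add_sub_cancel]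
  rw [getD_map_range _ _ _ _ (by omega), getD_map_range _ _ _ _ (by omega)]
  rw [haN, hSumPrev integers (j+1) hj]
  by_cases he : (aSorted integers).getD (j+1) 0 = (aSorted integers).getD j 0
  · rw [if_pos he, if_pos he]
    have hlen : bn + 1 ≤ (pvRow (aSorted integers) (pvSum integers) j).length := by
      rw [length_pvRow]
      rw [pvAlpha_congr _ _ _ _ he] at hbn
      omega
    have harg : (((bn : Int)) + 1).toNat = bn + 1 := by omega
    rw [harg]
    rw [foldl_range_getD _ 0 (· + ·) (bn+1) hlen 0]
    rfl
  · rw [if_neg he, if_neg he]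
    have harg : (pvAlpha (aSorted integers) (pvSum integers) j - 1 + 1).toNat
        = (pvRow (aSorted integers) (pvSum integers) j).length := by
      rw [length_pvRow]; omega
    rw [harg, foldl_range_getD _ 0 (· + ·) _ le_rfl 0, List.take_length]
    rfl

theorem hRowB0 (integers : List Int) (c : List Int) :
    bRow integers c 0 = pvRow (aSorted integers) (pvSum integers) 0 := by
  unfold bRow
  rw [show bA integers 0 = pvAlpha (aSorted integers) (pvSum integers) 0 from hbA integers 0]
  rw [pvRow]
  refine List.map_congr_left ?_
  intro bn _
  simp only [reduceIte]
  rfl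

theorem hRowB_succ (integers : List Int) (j : Nat)
    (hj : j + 1 ≤ (aSorted integers).length) :
    bRow integers (pvCum (pvRow (aSorted integers) (pvSum integers) j)) (j+1)
      = pvRow (aSorted integers) (pvSum integers) (j+1) := by
  unfold bRow
  rw [hbA]
  rw [pvRow]
  refine List.map_congr_left ?_
  intro bn hbn
  rw [List.mem_range] at hbn
  simp only [Nat.succ_ne_zero, reduceIte, Nat.add_sub_cancel]
  rw [hbP, hPrefix_getD integers (j+1) hj,
      show bSorted integers = aSorted integers from rfl]
  by_cases he : (aSorted integers).getD (j+1) 0 = (aSorted integers).getD j 0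
  · rw [if_pos he, if_pos he]
    have hlen : bn < (pvRow (aSorted integers) (pvSum integers) j).length := by
      rw [length_pvRow]
      rw [pvAlpha_congr _ _ _ _ he] at hbn
      omega
    rw [pyGetD_pvCum _ _ hlen]
  · rw [if_neg he, if_neg he]
    rw [pyGetD_pvCum_neg]

def pvPrev (s : List Int) (P : Int) : Nat → List Int
  | 0 => []
  | (m+1) => pvCum (pvRow s P m)

theorem pvTot_succ (s : List Int) (P : Int) (m : Nat) :
    pvTot s P (m+1) = pvTot s P m + pvSum (pvRow s P m) := by
  unfold pvTot
  rw [List.range_succ, List.foldl_append]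
  rfl

theorem A_loop (integers : List Int) :
    ∀ m, m ≤ (aSorted integers).length →
      (List.range m).foldl (aStep integers) ([], [])
        = ((List.range m).map (pvAlpha (aSorted integers) (pvSum integers)),
           (List.range m).map (pvRow (aSorted integers) (pvSum integers))) := by
  intro m
  induction m with
  | zero => intro _; simp
  | succ m ih =>
    intro hm
    rw [List.range_succ, List.foldl_append, ih (by omega)]
    simp only [List.foldl_cons, List.foldl_nil]
    unfold aStep
    simp only [List.map_append]
    refine Prod.ext ?_ ?_
    · simp [hAlpha]
    · simp only
      congr 1
      cases m with
      | zero => simpa using hRowA0 integers _ _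
      | succ j => simpa using hRowA_succ integers j (by omega)

theorem B_loop (integers : List Int) :
    ∀ m, m ≤ (aSorted integers).length →
      (List.range m).foldl (bStep integers) ([], 0)
        = (pvPrev (aSorted integers) (pvSum integers) m,
           pvTot (aSorted integers) (pvSum integers) m) := by
  intro m
  induction m with
  | zero => intro _; simp [pvPrev, pvTot]
  | succ m ih =>
    intro hm
    rw [List.range_succ, List.foldl_append, ih (by omega)]
    simp only [List.foldl_cons, List.foldl_nil]
    unfold bStep
    have hrow : bRow integers (pvPrev (aSorted integers) (pvSum integers) m) m
        = pvRow (aSorted integers) (pvSum integers) m := by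
      cases m with
      | zero => exact hRowB0 integers _
      | succ j => exact hRowB_succ integers j (by omega)
    rw [hrow]
    simp only [cum_fold]
    refine Prod.ext ?_ ?_
    · simp only [pvPrev, pvCum, List.nil_append, zero_add]
    · simp only [pvTot_succ]
      simp [zero_add]

theorem final_sum (integers : List Int) :
    ∀ m, m ≤ (aSorted integers).length →
      (List.range m).foldl (fun acc j =>
        (List.range ((((List.range (aSorted integers).length).map
              (pvAlpha (aSorted integers) (pvSum integers))).getD j 0).toNat)).foldl
          (fun acc2 bn => acc2 + ((((List.range (aSorted integers).length).map
              (pvRow (aSorted integers) (pvSum integers))).getD j []).getD bn 0)) acc) 0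
        = pvTot (aSorted integers) (pvSum integers) m := by
  intro m
  induction m with
  | zero => intro _; simp [pvTot]
  | succ m ih =>
    intro hm
    rw [List.range_succ, List.foldl_append, ih (by omega)]
    simp only [List.foldl_cons, List.foldl_nil]
    rw [getD_map_range _ _ _ _ (by omega), getD_map_range _ _ _ _ (by omega)]
    rw [pvTot_succ]
    have hlen : (pvAlpha (aSorted integers) (pvSum integers) m).toNat
        = (pvRow (aSorted integers) (pvSum integers) m).length := (length_pvRow _ _ _).symm
    rw [hlen, foldl_range_getD _ 0 (· + ·) _ le_rfl _, List.take_length, foldl_add_init]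

theorem ports_agree (integers : List Int) :
    computeTotalNumOfExpansionsInSubspace integers
      = computeTotalNumOfExpansionsInSubspace_alt integers := by
  unfold computeTotalNumOfExpansionsInSubspace computeTotalNumOfExpansionsInSubspace_alt
  have hlen : integers.length = (aSorted integers).length := (aSorted_length integers).symm
  rw [hlen]
  rw [show bSorted integers = aSorted integers from rfl]
  rw [A_loop integers _ le_rfl, B_loop integers _ le_rfl]
  simp only
  exact final_sum integers _ le_rfl

-- ===== VERDICT (by name: the statement is the Claim_ definition above) =====
theorem computeTotalNumOfExpansionsInSubspace_spec : Claim_equal_computeTotalNumOfExpansionsInSubspace := by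
  intro integers _ _
  unfold Spec_computeTotalNumOfExpansionsInSubspace
  exact ports_agree integers
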